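-- pv_equiv track=rewrite | github.com/rhgrant10/advent-of-code | 2017/14/disk-defragmentation-2.py | get_connected_neighbors
-- ===== SOURCE A (Python) =====
-- def get_connected_neighbors(coord):
--     neighborhood = get_neighborhood(coord)
--     connected = [
--         neighborhood[0][1],
--         neighborhood[1][0], neighborhood[1][2],
--         neighborhood[2][1],
--     ]
--     yield from [coord for coord in connected if is_inbounds(*coord)]
--
-- def get_neighborhood(coord):
--     neighborhood = []
--     y, x = coord
--     for ny in range(y - 1, y + 2):
--         street = [(ny, nx) for nx in range(x - 1, x + 2)]
--         neighborhood.append(street)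
--     return neighborhood
--
-- def is_inbounds(y, x, size=128):
--     return 0 <= x < size and 0 <= y < size
-- ===== SOURCE B (Python) =====
-- def get_connected_neighbors(coord):
--     y, x = coord
--     for dy, dx in ((-1, 0), (0, -1), (0, 1), (1, 0)):
--         ny, nx = y + dy, x + dx
--         if is_inbounds(ny, nx):
--             yield (ny, nx)
--
-- def is_inbounds(y, x, size=128):
--     return 0 <= x < size and 0 <= y < size
-- ===== Notes on version B (the rewrite author's own statement) =====
-- stated objective: simpler
-- what changed: B drops the 3x3 neighborhood table and generates the four orthogonal neighbors directly from a delta list (up, left, right, down), filtering with is_inbounds as it goes.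
import Mathlib
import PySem

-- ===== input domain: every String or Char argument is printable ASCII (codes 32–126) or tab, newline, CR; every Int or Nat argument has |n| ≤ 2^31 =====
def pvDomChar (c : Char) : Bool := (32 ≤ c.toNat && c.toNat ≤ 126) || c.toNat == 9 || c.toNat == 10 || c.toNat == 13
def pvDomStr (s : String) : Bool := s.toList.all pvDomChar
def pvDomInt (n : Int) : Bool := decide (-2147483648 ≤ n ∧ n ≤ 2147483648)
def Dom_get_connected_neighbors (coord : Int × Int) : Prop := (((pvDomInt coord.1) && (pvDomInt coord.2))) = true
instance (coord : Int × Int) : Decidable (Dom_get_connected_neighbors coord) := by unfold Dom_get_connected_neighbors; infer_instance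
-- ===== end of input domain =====

-- B drops the 3x3 neighborhood table and yields the four orthogonal neighbors
-- directly from a delta list in the same order (up, left, right, down): simpler decomposition.

-- ===== PORT A =====
def pvIsInbounds (y : Int) (x : Int) (size : Int) : Bool :=
  (0 ≤ x && x < size) && (0 ≤ y && y < size)

def pvGetNeighborhood (coord : Int × Int) : List (List (Int × Int)) :=
  let y := coord.1
  let x := coord.2
  (PySem.List.pyRange (y - 1) (y + 2) 1).foldl
    (fun acc ny => acc ++ [(PySem.List.pyRange (x - 1) (x + 2) 1).map (fun nx => (ny, nx))])
    []

-- indexing neighborhood[i][j]: the neighborhood is always a 3×3 table, so the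
-- pyGetD defaults are never reached (indices 0,1,2 are in range).
def get_connected_neighbors (coord : Int × Int) : List (Int × Int) :=
  let n := pvGetNeighborhood coord
  let connected : List (Int × Int) :=
    [ PySem.List.pyGetD (PySem.List.pyGetD n 0 []) 1 (0, 0),
      PySem.List.pyGetD (PySem.List.pyGetD n 1 []) 0 (0, 0),
      PySem.List.pyGetD (PySem.List.pyGetD n 1 []) 2 (0, 0),
      PySem.List.pyGetD (PySem.List.pyGetD n 2 []) 1 (0, 0) ]
  connected.filter (fun c => pvIsInbounds c.1 c.2 128)

-- ===== PORT B =====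
def pvIsInboundsAlt (y : Int) (x : Int) (size : Int) : Bool :=
  (0 ≤ x && x < size) && (0 ≤ y && y < size)

def get_connected_neighbors_alt (coord : Int × Int) : List (Int × Int) :=
  [((-1 : Int), (0 : Int)), (0, -1), (0, 1), (1, 0)].foldl
    (fun acc d =>
      let ny := coord.1 + d.1
      let nx := coord.2 + d.2
      if pvIsInboundsAlt ny nx 128 then acc ++ [(ny, nx)] else acc)
    []

-- ===== PRECONDITION & SPEC =====
def Spec_get_connected_neighbors (coord : Int × Int) (out : List (Int × Int)) : Prop := out = get_connected_neighbors_alt coord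
instance (coord : Int × Int) (out : List (Int × Int)) : Decidable (Spec_get_connected_neighbors coord out) := by unfold Spec_get_connected_neighbors; infer_instance

-- ===== CLAIM (what is proved, stated in full; the proofs are below) =====
def Claim_equal_get_connected_neighbors : Prop := ∀ (coord : Int × Int), Dom_get_connected_neighbors coord → Spec_get_connected_neighbors coord (get_connected_neighbors coord)

-- ===== LEMMAS AND PROOFS =====
lemma pvRange3 (a b : Int) (h : b = a + 3) :
    PySem.List.pyRange a b 1 = [a, a + 1, a + 2] := by
  subst h
  rw [PySem.List.pyRange_one_cons (by omega), PySem.List.pyRange_one_cons (by omega),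
      PySem.List.pyRange_one_cons (by omega)]
  simp [PySem.List.pyRange]
  omega

lemma pvMain (y x : Int) :
    List.filter (fun c => pvIsInbounds c.1 c.2 128)
      [(y - 1, x - 1 + 1), (y - 1 + 1, x - 1), (y - 1 + 1, x - 1 + 2), (y - 1 + 2, x - 1 + 1)]
    = List.foldl (fun acc (d : Int × Int) =>
        if pvIsInboundsAlt (y + d.1) (x + d.2) 128 then acc ++ [(y + d.1, x + d.2)] else acc)
        [] [(-1, 0), (0, -1), (0, 1), (1, 0)] := by
  rw [PySem.List.foldl_append_if (fun d : Int × Int => pvIsInboundsAlt (y + d.1) (x + d.2) 128)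
        (fun d : Int × Int => (y + d.1, x + d.2))]
  have e3 : y - 1 = y + -1 := by ring
  have e4 : x - 1 = x + -1 := by ring
  have e7 : y + -1 + 1 = y + 0 := by ring
  have e8 : x + -1 + 1 = x + 0 := by ring
  have e9 : x + -1 + 2 = x + 1 := by ring
  have e10 : y + -1 + 2 = y + 1 := by ring
  simp only [List.nil_append, List.filter, e3, e4, e7, e8, e9, e10]
  have hA : pvIsInbounds (y + -1) (x + 0) 128 = pvIsInboundsAlt (y + -1) (x + 0) 128 := rfl
  have hB : pvIsInbounds (y + 0) (x + -1) 128 = pvIsInboundsAlt (y + 0) (x + -1) 128 := rfl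
  have hC : pvIsInbounds (y + 0) (x + 1) 128 = pvIsInboundsAlt (y + 0) (x + 1) 128 := rfl
  have hD : pvIsInbounds (y + 1) (x + 0) 128 = pvIsInboundsAlt (y + 1) (x + 0) 128 := rfl
  rw [hA, hB, hC, hD]
  cases pvIsInboundsAlt (y + -1) (x + 0) 128 <;>
  cases pvIsInboundsAlt (y + 0) (x + -1) 128 <;>
  cases pvIsInboundsAlt (y + 0) (x + 1) 128 <;>
  cases pvIsInboundsAlt (y + 1) (x + 0) 128 <;> rfl

-- ===== VERDICT (by name: the statement is the Claim_ definition above) =====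
theorem get_connected_neighbors_spec : Claim_equal_get_connected_neighbors := by
  intro coord _
  obtain ⟨y, x⟩ := coord
  simp only [Spec_get_connected_neighbors, get_connected_neighbors,
    get_connected_neighbors_alt, pvGetNeighborhood]
  rw [pvRange3 (y - 1) (y + 2) (by ring), pvRange3 (x - 1) (x + 2) (by ring)]
  exact pvMain y x
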